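-- pv_equiv track=rewrite | github.com/Data-Viewer/Python-Exercises---Version-1 | E3raindrops.py | convert
-- ===== SOURCE A (Python) =====
-- def convert(number):
--     factors = [3,5,7]
--     keywords = {3:"Pling", 5:"Plang", 7:"Plong"}
--     results = []
--
--     for i in factors:
--         if number % i == 0:
--             results.append(i)
--     if len(results) > 0:
--         first = ""
--         second = ""
--         third = ""
--         if 3 in results:
--             first = keywords[3]
--         if 5 in results:
--             second = keywords[5]
--         if 7 in results:
--             third = keywords[7]
--         return first+second+third
--     else:
--         return str(number)
-- ===== SOURCE B (Python) =====
-- _TABLE = ["", "Pling", "Plang", "PlingPlang",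
--           "Plong", "PlingPlong", "PlangPlong", "PlingPlangPlong"]
--
-- def convert(number):
--     idx = ((number % 3 == 0) * 1
--            | (number % 5 == 0) * 2
--            | (number % 7 == 0) * 4)
--     return _TABLE[idx] if idx else str(number)
-- ===== Notes on version B (the rewrite author's own statement) =====
-- stated objective: alternative
-- what changed: B encodes the three divisibility tests as a 3-bit mask and looks the answer up in a precomputed table of all 8 possible raindrop strings, replacing A's build-a-factor-list, membership re-checks and string concatenation entirely.
import Mathlib
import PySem

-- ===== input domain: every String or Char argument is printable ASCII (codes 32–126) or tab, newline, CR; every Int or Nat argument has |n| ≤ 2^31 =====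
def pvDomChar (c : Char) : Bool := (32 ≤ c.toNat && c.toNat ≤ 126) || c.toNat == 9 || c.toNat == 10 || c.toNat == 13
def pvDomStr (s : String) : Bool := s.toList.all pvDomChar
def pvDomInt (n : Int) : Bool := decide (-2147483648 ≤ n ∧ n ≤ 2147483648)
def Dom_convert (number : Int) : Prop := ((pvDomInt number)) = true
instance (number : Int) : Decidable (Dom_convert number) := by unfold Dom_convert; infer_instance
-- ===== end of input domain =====

-- B replaces A's build-a-factor-list + membership-recheck + concatenation by a
-- 3-bit divisibility mask indexing a precomputed table of all 8 answers; objective: alternative.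

-- ===== PORT A =====
def convert (number : Int) : String :=
  let factors : List Int := [3, 5, 7]
  let keywords : PySem.Dict Int String :=
    PySem.Dict.ofList [(3, "Pling"), (5, "Plang"), (7, "Plong")]
  let results : List Int :=
    factors.foldl (fun acc i =>
      if PySem.Int.mod number i == 0 then acc ++ [i] else acc) []
  if results.length > 0 then
    let first := if (3 : Int) ∈ results then (PySem.Dict.get? keywords 3).getD "" else ""
    let second := if (5 : Int) ∈ results then (PySem.Dict.get? keywords 5).getD "" else ""
    let third := if (7 : Int) ∈ results then (PySem.Dict.get? keywords 7).getD "" else ""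
    first ++ second ++ third
  else
    PySem.Int.toStr number

-- ===== PORT B =====
def pvTable : List String :=
  ["", "Pling", "Plang", "PlingPlang", "Plong", "PlingPlong", "PlangPlong", "PlingPlangPlong"]

def convert_alt (number : Int) : String :=
  let idx : Int :=
    PySem.Int.bor
      (PySem.Int.bor
        ((if PySem.Int.mod number 3 == 0 then (1 : Int) else 0) * 1)
        ((if PySem.Int.mod number 5 == 0 then (1 : Int) else 0) * 2))
      ((if PySem.Int.mod number 7 == 0 then (1 : Int) else 0) * 4)
  if idx ≠ 0 then (PySem.List.pyGet? pvTable idx).getD "" else PySem.Int.toStr number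

-- ===== PRECONDITION & SPEC =====
def Spec_convert (number : Int) (out : String) : Prop := out = convert_alt number
instance (number : Int) (out : String) : Decidable (Spec_convert number out) := by unfold Spec_convert; infer_instance

-- ===== CLAIM (what is proved, stated in full; the proofs are below) =====
def Claim_equal_convert : Prop := ∀ (number : Int), Dom_convert number → Spec_convert number (convert number)

-- ===== LEMMAS AND PROOFS =====

-- ===== VERDICT (by name: the statement is the Claim_ definition above) =====
theorem convert_spec : Claim_equal_convert := by
  intro n _
  unfold Spec_convert convert convert_alt
  by_cases h3 : (3 : Int) ∣ n <;>
    by_cases h5 : (5 : Int) ∣ n <;>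
      by_cases h7 : (7 : Int) ∣ n
  all_goals simp [PySem.Int.mod_eq_zero_iff_dvd, h3, h5, h7]
  all_goals first
    | decide
    | (rw [if_neg (by decide)]; decide)
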